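-- pv_equiv track=rewrite | github.com/Sophie-Ha/ML-Anonymizer | sentiment.py | get_keyphrase_scores_word_level
-- ===== SOURCE A (Python) =====
-- def get_keyphrase_scores_word_level(target_dict, res_dict):
--     """ Checks keyphrase results on a word-level """
--     fp = 0
--     tp = 0
--     fn = 0
--     for key in target_dict:
--         if key in res_dict:
--             t_list = []
--             for t in [keyphrase.split() for keyphrase in target_dict[key]]:
--                 t_list += t
--             t_list.sort()
--
--             p_list = []
--             for p in [keyphrase.split() for keyphrase in res_dict[key]]:
--                 p_list += p
--             p_list.sort()
--
--             for t in t_list: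
--                 if t in p_list:
--                     tp += 1
--                     p_list.remove(t)
--                 else:
--                     fn += 1
--             fp += len(p_list)
--     return fp, tp, fn
-- ===== SOURCE B (Python) =====
-- def get_keyphrase_scores_word_level(target_dict, res_dict):
--     """ Checks keyphrase results on a word-level """
--     fp = 0
--     tp = 0
--     fn = 0
--     for key, phrases in target_dict.items():
--         if key in res_dict:
--             ts = [w for kp in phrases for w in kp.split()]
--             ps = [w for kp in res_dict[key] for w in kp.split()]
--             m = sum(min(ts.count(w), ps.count(w)) for w in dict.fromkeys(ts))
--             fp += len(ps) - m
--             tp += m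
--             fn += len(ts) - m
--     return fp, tp, fn
-- ===== Notes on version B (the rewrite author's own statement) =====
-- stated objective: alternative
-- what changed: B drops A's sorting and destructive remove-scan over the result words entirely and instead computes the per-key match count as a closed multiset-intersection formula (sum over distinct target words of min of the two occurrence counts), deriving fn and fp by subtraction from the list lengths.
import Mathlib
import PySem

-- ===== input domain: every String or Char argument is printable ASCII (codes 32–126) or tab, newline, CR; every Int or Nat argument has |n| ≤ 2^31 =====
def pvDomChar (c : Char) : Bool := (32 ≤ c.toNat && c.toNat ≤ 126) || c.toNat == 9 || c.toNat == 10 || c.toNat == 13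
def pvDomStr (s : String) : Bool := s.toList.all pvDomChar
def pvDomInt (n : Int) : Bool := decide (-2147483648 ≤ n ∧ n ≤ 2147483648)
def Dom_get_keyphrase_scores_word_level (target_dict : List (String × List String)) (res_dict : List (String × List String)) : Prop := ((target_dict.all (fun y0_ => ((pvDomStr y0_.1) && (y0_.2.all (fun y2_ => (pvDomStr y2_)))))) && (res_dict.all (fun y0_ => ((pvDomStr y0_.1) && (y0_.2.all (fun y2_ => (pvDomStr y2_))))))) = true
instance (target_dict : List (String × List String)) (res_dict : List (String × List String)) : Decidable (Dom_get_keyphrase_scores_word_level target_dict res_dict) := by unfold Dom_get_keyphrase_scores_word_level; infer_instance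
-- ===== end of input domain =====

-- B replaces A's sort + destructive remove-scan by a closed counting formula
-- (per key: matches = sum over distinct target words of min of the two counts);
-- objective: alternative algorithm of similar cost, no sorting and no list mutation.

-- ===== PORT A =====
-- dict lookup on the association list (first match), shared by both ports ('key in d' / 'd[key]')
def pvLookup (d : List (String × List String)) (k : String) : Option (List String) :=
  (d.find? (fun p => p.1 == k)).map (·.2)

-- A's word-list building loop: 'lst = []; for t in [kp.split() for kp in phrases]: lst += t'
def pvWordsA (phrases : List String) : List String :=
  phrases.foldl (fun acc kp => acc ++ PySem.Str.split₀ kp) []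

-- A's inner loop body over state (tp, fn, p_list): 'if t in p_list: tp += 1; p_list.remove(t) else: fn += 1'
def pvStepInA (st : Int × Int × List String) (t : String) : Int × Int × List String :=
  match PySem.List.remove? st.2.2 t with
  | some ps' => (st.1 + 1, st.2.1, ps')
  | none => (st.1, st.2.1 + 1, st.2.2)

-- A's outer loop body over state (fp, tp, fn)
def pvStepA (res_dict : List (String × List String)) (acc : Int × Int × Int)
    (kv : String × List String) : Int × Int × Int :=
  match pvLookup res_dict kv.1 with
  | none => acc
  | some rv =>
    let t_list := PySem.List.sorted (pvWordsA kv.2) (fun w => w) false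
    let p_list := PySem.List.sorted (pvWordsA rv) (fun w => w) false
    let s := t_list.foldl pvStepInA (acc.2.1, acc.2.2, p_list)
    (acc.1 + (s.2.2.length : Int), s.1, s.2.1)

def get_keyphrase_scores_word_level (target_dict : List (String × List String)) (res_dict : List (String × List String)) : Int × Int × Int :=
  target_dict.foldl (pvStepA res_dict) (0, 0, 0)

-- ===== PORT B =====
-- B's word comprehension: '[w for kp in phrases for w in kp.split()]'
def pvWordsB (phrases : List String) : List String :=
  phrases.flatMap (fun kp => PySem.Str.split₀ kp)

-- B's loop body: m = sum(min(ts.count(w), ps.count(w)) for w in dict.fromkeys(ts))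
def pvStepB (res_dict : List (String × List String)) (acc : Int × Int × Int)
    (kv : String × List String) : Int × Int × Int :=
  match pvLookup res_dict kv.1 with
  | none => acc
  | some rv =>
    let ts := pvWordsB kv.2
    let ps := pvWordsB rv
    let m : Int := ((PySem.List.dedup ts).map (fun w => min (ts.count w : Int) (ps.count w : Int))).sum
    (acc.1 + ((ps.length : Int) - m), acc.2.1 + m, acc.2.2 + ((ts.length : Int) - m))

def get_keyphrase_scores_word_level_alt (target_dict : List (String × List String)) (res_dict : List (String × List String)) : Int × Int × Int :=
  target_dict.foldl (pvStepB res_dict) (0, 0, 0)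

-- ===== PRECONDITION & SPEC =====
def Spec_get_keyphrase_scores_word_level (target_dict : List (String × List String)) (res_dict : List (String × List String)) (out : Int × Int × Int) : Prop := out = get_keyphrase_scores_word_level_alt target_dict res_dict
instance (target_dict : List (String × List String)) (res_dict : List (String × List String)) (out : Int × Int × Int) : Decidable (Spec_get_keyphrase_scores_word_level target_dict res_dict out) := by unfold Spec_get_keyphrase_scores_word_level; infer_instance

-- ===== CLAIM (what is proved, stated in full; the proofs are below) =====
def Claim_equal_get_keyphrase_scores_word_level : Prop := ∀ (target_dict : List (String × List String)) (res_dict : List (String × List String)), Dom_get_keyphrase_scores_word_level target_dict res_dict → Spec_get_keyphrase_scores_word_level target_dict res_dict (get_keyphrase_scores_word_level target_dict res_dict)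

-- ===== LEMMAS AND PROOFS =====

-- the multiset-intersection size: number of word matches A's inner loop makes
def pvM (ts ps : List String) : ℕ := Multiset.card ((↑ts : Multiset String) ∩ ↑ps)

theorem pvM_nil (ps : List String) : pvM [] ps = 0 := by
  simp [pvM]

theorem pvM_cons_mem {t : String} {ps : List String} (ts : List String) (h : t ∈ ps) :
    pvM (t :: ts) ps = pvM ts (ps.erase t) + 1 := by
  have hm : t ∈ (↑ps : Multiset String) := by simpa using h
  show Multiset.card ((t ::ₘ (↑ts : Multiset String)) ∩ ↑ps) = _
  rw [Multiset.cons_inter_of_pos _ hm, Multiset.card_cons]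
  unfold pvM
  rw [← Multiset.coe_erase]

theorem pvM_cons_not_mem {t : String} {ps : List String} (ts : List String) (h : t ∉ ps) :
    pvM (t :: ts) ps = pvM ts ps := by
  have hm : t ∉ (↑ps : Multiset String) := by simpa using h
  show Multiset.card ((t ::ₘ (↑ts : Multiset String)) ∩ ↑ps) = _
  rw [Multiset.cons_inter_of_neg _ hm]
  rfl

-- A's inner loop computed in closed form
theorem inner_spec (ts : List String) : ∀ (ps : List String) (tp fn : Int),
    ∃ ps', ts.foldl pvStepInA (tp, fn, ps)
        = (tp + (pvM ts ps : Int), fn + ((ts.length : Int) - (pvM ts ps : Int)), ps')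
      ∧ ps'.length + pvM ts ps = ps.length := by
  induction ts with
  | nil => intro ps tp fn; exact ⟨ps, by simp [pvM_nil], by simp [pvM_nil]⟩
  | cons t ts ih =>
    intro ps tp fn
    by_cases h : t ∈ ps
    · have hrem : PySem.List.remove? ps t = some (ps.erase t) :=
        PySem.List.remove?_eq_some_erase ps t h
      obtain ⟨ps', heq, hlen⟩ := ih (ps.erase t) (tp + 1) fn
      refine ⟨ps', ?_, ?_⟩
      · simp only [List.foldl_cons, pvStepInA, hrem, heq, pvM_cons_mem ts h,
          List.length_cons, Prod.mk.injEq]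
        refine ⟨by push_cast; ring, by push_cast; ring, trivial⟩
      · have h1 := List.length_erase_of_mem h
        have h2 : 0 < ps.length := List.length_pos_of_mem h
        rw [pvM_cons_mem ts h]
        omega
    · have hrem : PySem.List.remove? ps t = none :=
        (PySem.List.remove?_eq_none_iff ps t).mpr h
      obtain ⟨ps', heq, hlen⟩ := ih ps tp (fn + 1)
      refine ⟨ps', ?_, ?_⟩
      · simp only [List.foldl_cons, pvStepInA, hrem, heq, pvM_cons_not_mem ts h,
          List.length_cons, Prod.mk.injEq]
        refine ⟨trivial, by push_cast; ring, trivial⟩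
      · rw [pvM_cons_not_mem ts h]; exact hlen

theorem pv_list_sum_cast (l : List ℕ) : (l.map (Nat.cast : ℕ → Int)).sum = ((l.sum : ℕ) : Int) := by
  induction l with
  | nil => simp
  | cons a l ih => rw [List.map_cons, List.sum_cons, ih, List.sum_cons]; push_cast; ring

-- B's counting sum equals the multiset-intersection size
theorem pvM_eq_sum (ts ps : List String) :
    ((PySem.List.dedup ts).map (fun w => min (ts.count w : Int) (ps.count w : Int))).sum
      = (pvM ts ps : Int) := by
  have hcast : ((PySem.List.dedup ts).map (fun w => min (ts.count w : Int) (ps.count w : Int)))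
      = ((PySem.List.dedup ts).map (fun w => min (ts.count w) (ps.count w))).map
          (Nat.cast : ℕ → Int) := by
    rw [List.map_map]
    refine List.map_congr_left (fun w _ => ?_)
    simp [Nat.cast_min]
  rw [hcast, pv_list_sum_cast]
  congr 1
  have hnodup : (PySem.List.dedup ts).Nodup := PySem.List.nodup_dedup ts
  rw [← List.sum_toFinset _ hnodup]
  have hfs : (PySem.List.dedup ts).toFinset = ts.toFinset := by
    ext x; simp
  rw [hfs]
  have hcnt : ∀ w, min (ts.count w) (ps.count w)
      = Multiset.count w ((↑ts : Multiset String) ∩ ↑ps) := by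
    intro w; rw [Multiset.count_inter]; simp
  calc (∑ w ∈ ts.toFinset, min (ts.count w) (ps.count w))
      = ∑ w ∈ ts.toFinset, Multiset.count w ((↑ts : Multiset String) ∩ ↑ps) :=
        Finset.sum_congr rfl (fun w _ => hcnt w)
    _ = ∑ w ∈ ((↑ts : Multiset String) ∩ ↑ps).toFinset,
          Multiset.count w ((↑ts : Multiset String) ∩ ↑ps) := by
        refine (Finset.sum_subset ?_ ?_).symm
        · intro x hx
          have : x ∈ (↑ts : Multiset String) ∩ ↑ps := Multiset.mem_toFinset.mp hx
          have : x ∈ (↑ts : Multiset String) := Multiset.mem_of_le Multiset.inter_le_left this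
          simpa using this
        · intro x _ hx
          exact Multiset.count_eq_zero.mpr (fun hm => hx (Multiset.mem_toFinset.mpr hm))
    _ = pvM ts ps := Multiset.toFinset_sum_count_eq _

-- pvM and length are invariant under sorting
theorem pvM_sorted (ts ps : List String) :
    pvM (PySem.List.sorted ts (fun w => w) false) (PySem.List.sorted ps (fun w => w) false)
      = pvM ts ps := by
  have h1 : ((PySem.List.sorted ts (fun w => w) false : List String) : Multiset String) = ↑ts :=
    Multiset.coe_eq_coe.mpr (PySem.List.sorted_perm ts (fun w => w) false)
  have h2 : ((PySem.List.sorted ps (fun w => w) false : List String) : Multiset String) = ↑ps :=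
    Multiset.coe_eq_coe.mpr (PySem.List.sorted_perm ps (fun w => w) false)
  simp [pvM, h1, h2]

theorem wordsA_eq (phrases : List String) : pvWordsA phrases = pvWordsB phrases := by
  rw [pvWordsA, pvWordsB, PySem.List.foldl_append_eq_flatMap, List.nil_append]

-- the two loop bodies agree on every state and key
theorem step_eq (res_dict : List (String × List String)) (acc : Int × Int × Int)
    (kv : String × List String) : pvStepA res_dict acc kv = pvStepB res_dict acc kv := by
  unfold pvStepA pvStepB
  cases hl : pvLookup res_dict kv.1 with
  | none => rfl
  | some rv =>
    simp only [wordsA_eq]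
    obtain ⟨ps', heq, hlen⟩ := inner_spec
      (PySem.List.sorted (pvWordsB kv.2) (fun w => w) false)
      (PySem.List.sorted (pvWordsB rv) (fun w => w) false) acc.2.1 acc.2.2
    simp only [heq, pvM_eq_sum, pvM_sorted]
    have hM := pvM_sorted (pvWordsB kv.2) (pvWordsB rv)
    rw [hM] at heq hlen
    have hlt : (PySem.List.sorted (pvWordsB kv.2) (fun w => w) false).length
        = (pvWordsB kv.2).length := PySem.List.length_sorted _ _ _
    have hlp : (PySem.List.sorted (pvWordsB rv) (fun w => w) false).length
        = (pvWordsB rv).length := PySem.List.length_sorted _ _ _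
    refine Prod.ext ?_ (Prod.ext ?_ ?_) <;> simp <;> omega

-- ===== VERDICT (by name: the statement is the Claim_ definition above) =====
theorem get_keyphrase_scores_word_level_spec : Claim_equal_get_keyphrase_scores_word_level := by
  intro target_dict res_dict _
  unfold Spec_get_keyphrase_scores_word_level
  unfold get_keyphrase_scores_word_level get_keyphrase_scores_word_level_alt
  have h : pvStepA res_dict = pvStepB res_dict :=
    funext fun acc => funext fun kv => step_eq res_dict acc kv
  rw [h]
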